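-- pv_equiv track=rewrite | github.com/pypi-data/pypi-mirror-236 | packages/as3lib/as3lib-0.0.7.tar.gz/as3lib-0.0.7/as3lib/interface_tk.py | _checkName
-- ===== SOURCE A (Python) =====
-- def _checkName(name:str):
--    blacklist = ["(",")","{","}","[","]","!","@","#","$","%","^","&","*",",",".","<",">","/","\\","|","'","\"",":",";","-","+","=","~","`"]
--    if name[0].isalpha():
--       array = [i in name for i in blacklist]
--       try:
--          i = array.index(True)
--          return False
--       except:
--          return True
--    else:
--       return False
-- ===== SOURCE B (Python) =====
-- _BLACKLIST = set("(){}[]!@#$%^&*,.<>/\\|'\":;-+=~`")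
--
-- def _checkName(name: str):
--     if not name[0].isalpha():
--         return False
--     for c in name:
--         if c in _BLACKLIST:
--             return False
--     return True
-- ===== Notes on version B (the rewrite author's own statement) =====
-- stated objective: idiomatic
-- what changed: Inverted the traversal: instead of mapping every blacklist symbol to a substring scan of the name and then list.index-ing the result, B makes a single pass over the name's characters testing membership in a precomputed blacklist set, short-circuiting on the first hit.
import Mathlib
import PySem

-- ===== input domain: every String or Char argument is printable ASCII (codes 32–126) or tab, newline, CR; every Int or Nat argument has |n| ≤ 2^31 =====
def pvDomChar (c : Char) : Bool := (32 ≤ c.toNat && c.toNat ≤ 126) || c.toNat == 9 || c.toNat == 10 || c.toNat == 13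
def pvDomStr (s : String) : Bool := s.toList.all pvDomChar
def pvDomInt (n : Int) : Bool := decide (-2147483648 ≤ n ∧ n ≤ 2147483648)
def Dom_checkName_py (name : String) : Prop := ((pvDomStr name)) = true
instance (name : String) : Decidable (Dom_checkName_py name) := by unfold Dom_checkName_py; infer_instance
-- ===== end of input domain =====

-- B inverts the traversal: A scans the name once per blacklist symbol and indexes the resulting
-- Boolean list; B makes one pass over the name's characters with a precomputed blacklist set (idiomatic).
-- ===== PORT A =====
def checkName_py (name : String) : Bool :=
  let blacklist : List String :=
    ["(",")","{","}","[","]","!","@","#","$","%","^","&","*",",",".","<",">","/","\\","|","'","\"",":",";","-","+","=","~","`"]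
  match PySem.Str.pyGet? name 0 with
  | none => false  -- name[0] raises IndexError in Python; excluded by Pre_
  | some c0 =>
    if PySem.Chars.isalpha c0 then
      let array : List Bool := blacklist.map (fun i => PySem.Str.isIn i name)
      match PySem.List.index? array true with
      | some _ => false
      | none => true
    else
      false

-- ===== PORT B =====
def pvBlacklistSet : PySem.Set Char :=
  PySem.Set.ofList ("(){}[]!@#$%^&*,.<>/\\|'\":;-+=~`".toList)

def checkName_py_alt (name : String) : Bool :=
  match PySem.Str.pyGet? name 0 with
  | none => false  -- name[0] raises IndexError in Python; excluded by Pre_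
  | some c0 =>
    if !PySem.Chars.isalpha c0 then false
    else
      -- for c in name: if c in _BLACKLIST: return False / return True
      name.toList.all (fun c => !(PySem.Set.contains pvBlacklistSet c))

-- ===== PRECONDITION & SPEC =====
-- Pre_ excludes only the empty string, on which both A and B raise IndexError at name[0].
def Pre_checkName_py (name : String) : Prop := name ≠ ""
instance (name : String) : Decidable (Pre_checkName_py name) := by unfold Pre_checkName_py; infer_instance
def pvWitness_checkName_py : String := "abc"

def Spec_checkName_py (name : String) (out : Bool) : Prop := out = checkName_py_alt name
instance (name : String) (out : Bool) : Decidable (Spec_checkName_py name out) := by unfold Spec_checkName_py; infer_instance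

-- ===== CLAIM (what is proved, stated in full; the proofs are below) =====
def Claim_equal_checkName_py : Prop := ∀ (name : String), Dom_checkName_py name → Pre_checkName_py name → Spec_checkName_py name (checkName_py name)

-- ===== LEMMAS AND PROOFS =====

-- the blacklist of A is exactly the singleton strings of the characters of B's set
lemma pv_blacklist_eq :
    (["(",")","{","}","[","]","!","@","#","$","%","^","&","*",",",".","<",">","/","\\","|","'","\"",":",";","-","+","=","~","`"] : List String)
      = ("(){}[]!@#$%^&*,.<>/\\|'\":;-+=~`".toList).map (fun c => String.ofList [c]) := by
  decide

lemma pv_toList_ofList (c : Char) : (String.ofList [c]).toList = [c] := by simp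

lemma pv_singleton_infix {α : Type} (a : α) (l : List α) : [a] <:+: l ↔ a ∈ l := by
  constructor
  · intro h
    exact h.mem (List.mem_singleton_self a)
  · intro h
    obtain ⟨s, t, rfl⟩ := List.append_of_mem h
    exact ⟨s, t, by simp⟩

lemma pv_str_isIn_singleton (c : Char) (s : String) :
    PySem.Str.isIn (String.ofList [c]) s = decide (c ∈ s.toList) := by
  by_cases h : c ∈ s.toList
  · rw [decide_eq_true h, PySem.Str.isIn_iff_infix, pv_toList_ofList]
    exact (pv_singleton_infix c s.toList).mpr h
  · rw [decide_eq_false h, Bool.eq_false_iff]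
    intro ht
    have hi := (PySem.Str.isIn_iff_infix _ _).mp ht
    rw [pv_toList_ofList] at hi
    exact h ((pv_singleton_infix c s.toList).mp hi)

lemma pv_contains_set (c : Char) :
    PySem.Set.contains pvBlacklistSet c
      = decide (c ∈ ("(){}[]!@#$%^&*,.<>/\\|'\":;-+=~`".toList)) := by
  by_cases h : c ∈ ("(){}[]!@#$%^&*,.<>/\\|'\":;-+=~`".toList)
  · rw [decide_eq_true h]
    unfold pvBlacklistSet
    exact (PySem.Set.contains_iff _ _).mpr ((PySem.Set.mem_ofList _ _).mpr h)
  · rw [decide_eq_false h, Bool.eq_false_iff]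
    intro ht
    unfold pvBlacklistSet at ht
    exact h ((PySem.Set.mem_ofList _ _).mp ((PySem.Set.contains_iff _ _).mp ht))

-- core: A's "no blacklist symbol occurs as a substring" = B's "every character of name avoids the set"
lemma pv_core (name : String) :
    (PySem.List.index?
        ((("(){}[]!@#$%^&*,.<>/\\|'\":;-+=~`".toList).map (fun c => String.ofList [c])).map
          (fun i => PySem.Str.isIn i name)) true = none)
      ↔ (name.toList.all (fun c => !(PySem.Set.contains pvBlacklistSet c)) = true) := by
  rw [PySem.List.index?_eq_none_iff, List.map_map]
  constructor
  · intro h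
    rw [List.all_eq_true]
    intro c hc
    rw [pv_contains_set]
    by_cases hm : c ∈ ("(){}[]!@#$%^&*,.<>/\\|'\":;-+=~`".toList)
    · exfalso
      apply h
      refine List.mem_map.mpr ⟨c, hm, ?_⟩
      show PySem.Str.isIn (String.ofList [c]) name = true
      rw [pv_str_isIn_singleton, decide_eq_true hc]
    · rw [decide_eq_false hm]
      rfl
  · intro h hmem
    obtain ⟨c, hcm, heq⟩ := List.mem_map.mp hmem
    have heq' : PySem.Str.isIn (String.ofList [c]) name = true := heq
    rw [pv_str_isIn_singleton] at heq'
    have hcn : c ∈ name.toList := of_decide_eq_true heq'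
    have hall := (List.all_eq_true.mp h) c hcn
    rw [pv_contains_set, decide_eq_true hcm] at hall
    exact Bool.false_ne_true hall

-- ===== VERDICT (by name: the statement is the Claim_ definition above) =====
theorem checkName_py_spec : Claim_equal_checkName_py := by
  intro name _ _
  unfold Spec_checkName_py checkName_py checkName_py_alt
  rw [pv_blacklist_eq]
  cases hget : PySem.Str.pyGet? name 0 with
  | none => rfl
  | some c0 =>
    by_cases halpha : PySem.Chars.isalpha c0 = true
    · simp only [halpha, if_true, Bool.not_true, Bool.false_eq_true, if_false]
      cases hidx : PySem.List.index?
          ((("(){}[]!@#$%^&*,.<>/\\|'\":;-+=~`".toList).map (fun c => String.ofList [c])).map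
            (fun i => PySem.Str.isIn i name)) true with
      | some k =>
        rcases Bool.eq_false_or_eq_true
            (name.toList.all (fun c => !(PySem.Set.contains pvBlacklistSet c))) with hB | hB
        · have hnone := (pv_core name).mpr hB
          rw [hidx] at hnone
          exact (Option.some_ne_none k hnone).elim
        · exact hB.symm
      | none =>
        exact ((pv_core name).mp hidx).symm
    · simp [halpha]
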